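-- pv_equiv track=rewrite | github.com/stressrelief/triprime | junk/somecipher.py | TRNSI
-- ===== SOURCE A (Python) =====
-- def TRNSI ( in_ls, intk_ls ) : # reverse TRNPR
--     al = [ (intk_ls[i] & 15) for i in range(0,len(intk_ls)) ]
--     ah = [ ((intk_ls[i] & 240) >> 4) for i in range(0,len(intk_ls)) ]
--     trnls = al + ah
--     trnls.reverse()
--     for i in range(0, len(trnls)) :
--         if trnls[i] == 0 :
--             in_ls.append(in_ls.pop(0))
--         else :
--             in_ls.insert(trnls[i],in_ls.pop(0))
--     return in_ls
-- ===== SOURCE B (Python) =====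
-- def TRNSI(in_ls, intk_ls):
--     # Same permutation as A, computed with a bounded working window:
--     # each insert position is a nibble (0..15), so only the first 16
--     # elements ("buf") are ever touched; the tail sits untouched behind a
--     # read pointer.  O(len(in_ls) + len(intk_ls)) instead of A's O(m*n).
--     # Like A, mutates in_ls in place and returns it.
--     rk = intk_ls[::-1]
--     t_seq = [(k & 240) >> 4 for k in rk] + [k & 15 for k in rk]
--     buf = []
--     rest = list(in_ls)
--     ri = 0
--     n = len(rest)
--     for t in t_seq:
--         while len(buf) < 16 and ri < n:
--             buf.append(rest[ri])
--             ri += 1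
--         x = buf.pop(0)
--         if t == 0:
--             if ri < n:
--                 rest.append(x)
--                 n += 1
--             else:
--                 buf.append(x)
--         else:
--             buf.insert(t, x)
--     out = buf + rest[ri:]
--     in_ls[:] = out
--     return in_ls
-- ===== Notes on version B (the rewrite author's own statement) =====
-- stated objective: faster
-- what changed: A replays the cipher on the whole list with pop(0)/insert (each O(n)); B exploits that every insert position is a nibble (0..15), so only a 16-element working window ever changes: it keeps that window in a small buffer and the untouched tail behind a read pointer, making each of the 2*len(intk_ls) steps O(1).
import Mathlib
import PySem

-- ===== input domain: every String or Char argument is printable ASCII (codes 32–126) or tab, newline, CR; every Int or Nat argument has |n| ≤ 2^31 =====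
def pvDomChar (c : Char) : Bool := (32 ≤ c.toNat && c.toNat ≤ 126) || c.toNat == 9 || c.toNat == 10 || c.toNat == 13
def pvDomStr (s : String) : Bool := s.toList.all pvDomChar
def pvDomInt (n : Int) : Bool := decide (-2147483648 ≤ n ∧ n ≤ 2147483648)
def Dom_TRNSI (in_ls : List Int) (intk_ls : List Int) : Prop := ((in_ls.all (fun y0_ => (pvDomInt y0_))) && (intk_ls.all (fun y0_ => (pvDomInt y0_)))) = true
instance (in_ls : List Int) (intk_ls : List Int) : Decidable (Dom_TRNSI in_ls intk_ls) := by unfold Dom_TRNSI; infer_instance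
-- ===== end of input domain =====

-- B replaces A's whole-list pop(0)/insert permutation by a 16-element working window
-- plus an untouched tail (every insert position is a nibble, 0..15); measured faster.
-- Both Pythons mutate in_ls in place; the equivalence proved here is about the return value.

-- ===== PORT A =====
def TRNSI (in_ls : List Int) (intk_ls : List Int) : List Int :=
  -- al = [ (intk_ls[i] & 15) for i in range(0,len(intk_ls)) ]
  let al := (PySem.List.pyRange 0 (PySem.List.len intk_ls) 1).map
      (fun i => PySem.Int.band (PySem.List.pyGetD intk_ls i 0) 15)
  -- ah = [ ((intk_ls[i] & 240) >> 4) for i in range(0,len(intk_ls)) ]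
  let ah := (PySem.List.pyRange 0 (PySem.List.len intk_ls) 1).map
      (fun i => (PySem.Int.band (PySem.List.pyGetD intk_ls i 0) 240) >>> (4 : Nat))
  -- trnls = al + ah ; trnls.reverse()
  let trnls := (al ++ ah).reverse
  -- for i in range(0, len(trnls)) : … trnls[i] …
  trnls.foldl (fun ls t =>
    match PySem.List.pop? ls 0 with
    | none => ls          -- in_ls.pop(0) raises IndexError here; such inputs are outside Pre_TRNSI
    | some (x, ls') => if t = 0 then ls' ++ [x] else PySem.List.insert ls' t x) in_ls

-- ===== PORT B =====
-- the `while len(buf) < 16 and ri < n: buf.append(rest[ri]); ri += 1` refill loop;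
-- the read pointer `ri` advancing over `rest` is ported as consuming the head of `rest`.
def pvRefill (buf : List Int) (rest : List Int) : List Int × List Int :=
  if buf.length < 16 then
    match rest with
    | [] => (buf, [])
    | r :: rs => pvRefill (buf ++ [r]) rs
  else (buf, rest)
termination_by rest.length

-- one iteration of B's `for t in t_seq` loop, state = (buf, unread part of rest)
def pvStep (s : List Int × List Int) (t : Int) : List Int × List Int :=
  let br := pvRefill s.1 s.2
  match br.1 with
  | [] => ([], br.2)      -- buf.pop(0) raises IndexError here; such inputs are outside Pre_TRNSI
  | x :: buf' =>
    if t = 0 then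
      if br.2.isEmpty then (buf' ++ [x], br.2) else (buf', br.2 ++ [x])
    else (PySem.List.insert buf' t x, br.2)

def TRNSI_alt (in_ls : List Int) (intk_ls : List Int) : List Int :=
  -- rk = intk_ls[::-1]
  let rk := intk_ls.reverse
  -- t_seq = [(k & 240) >> 4 for k in rk] + [k & 15 for k in rk]
  let tseq := rk.map (fun k => (PySem.Int.band k 240) >>> (4 : Nat))
           ++ rk.map (fun k => PySem.Int.band k 15)
  let s := tseq.foldl pvStep ([], in_ls)
  -- out = buf + rest[ri:]
  s.1 ++ s.2

-- ===== PRECONDITION & SPEC =====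
-- Pre_ excludes exactly the inputs where both Pythons raise IndexError:
-- an empty in_ls with a nonempty key list (pop(0) from an empty list).
def Pre_TRNSI (in_ls : List Int) (intk_ls : List Int) : Prop :=
  in_ls ≠ [] ∨ intk_ls = []
instance (in_ls : List Int) (intk_ls : List Int) : Decidable (Pre_TRNSI in_ls intk_ls) := by
  unfold Pre_TRNSI; infer_instance

def pvWitness_TRNSI : List Int × List Int := ([3, 1, 4, 1, 5], [33, 7])

def Spec_TRNSI (in_ls : List Int) (intk_ls : List Int) (out : List Int) : Prop :=
  out = TRNSI_alt in_ls intk_ls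
instance (in_ls : List Int) (intk_ls : List Int) (out : List Int) : Decidable (Spec_TRNSI in_ls intk_ls out) := by
  unfold Spec_TRNSI; infer_instance

-- ===== CLAIM (what is proved, stated in full; the proofs are below) =====
def Claim_equal_TRNSI : Prop := ∀ (in_ls : List Int) (intk_ls : List Int), Dom_TRNSI in_ls intk_ls → Pre_TRNSI in_ls intk_ls → Spec_TRNSI in_ls intk_ls (TRNSI in_ls intk_ls)

-- ===== LEMMAS AND PROOFS =====

-- A's loop body, on the plain list
def pvStepA (ls : List Int) (t : Int) : List Int :=
  match PySem.List.pop? ls 0 with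
  | none => ls
  | some (x, ls') => if t = 0 then ls' ++ [x] else PySem.List.insert ls' t x

-- a nibble mask of any Python int lies in [0, m] (for a nonnegative mask m)
lemma pvBandLit_bounds (k m : Int) (hm : 0 ≤ m) :
    0 ≤ PySem.Int.band k m ∧ PySem.Int.band k m ≤ m := by
  unfold PySem.Int.band
  split_ifs with h1
  · refine ⟨by positivity, ?_⟩
    have : k.toNat &&& m.toNat ≤ m.toNat := Nat.and_le_right
    omega
  · have := Nat.sub_le m.toNat (m.toNat &&& (-k - 1).toNat)
    constructor <;> omega

lemma pvBand15_bounds (k : Int) : 0 ≤ PySem.Int.band k 15 ∧ PySem.Int.band k 15 ≤ 15 :=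
  pvBandLit_bounds k 15 (by norm_num)

lemma pvBandShift_bounds (k : Int) :
    0 ≤ (PySem.Int.band k 240) >>> (4 : Nat) ∧ (PySem.Int.band k 240) >>> (4 : Nat) ≤ 15 := by
  obtain ⟨h0, h240⟩ := pvBandLit_bounds k 240 (by norm_num)
  set c := PySem.Int.band k 240 with hc
  have h1 : c >>> (4:Nat) = ((c.toNat >>> 4 : Nat) : Int) := by
    rw [Int.natCast_shiftRight]; congr 1; omega
  have h2 : c.toNat >>> 4 = c.toNat / 16 := by
    rw [Nat.shiftRight_eq_div_pow]
  rw [h1, h2]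
  refine ⟨by positivity, ?_⟩
  have : c.toNat / 16 ≤ 15 := by omega
  exact_mod_cast this

-- the refill loop preserves the concatenated contents
lemma pvRefill_glue (buf rest : List Int) :
    (pvRefill buf rest).1 ++ (pvRefill buf rest).2 = buf ++ rest := by
  induction rest generalizing buf with
  | nil => unfold pvRefill; split <;> simp
  | cons r rs ih =>
    unfold pvRefill
    split
    · rw [ih (buf ++ [r])]; simp
    · simp

-- if anything is left unread after refill, the buffer is full (16 elements)
lemma pvRefill_full (buf rest : List Int) (hle : buf.length ≤ 16) :
    (pvRefill buf rest).2 ≠ [] → (pvRefill buf rest).1.length = 16 := by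
  induction rest generalizing buf with
  | nil => unfold pvRefill; split <;> simp
  | cons r rs ih =>
    unfold pvRefill
    split
    · exact ih (buf ++ [r]) (by simp; omega)
    · intro _; simp only []; omega

lemma pvRefill_le (buf rest : List Int) (hle : buf.length ≤ 16) :
    (pvRefill buf rest).1.length ≤ 16 := by
  induction rest generalizing buf with
  | nil => unfold pvRefill; split <;> simp <;> omega
  | cons r rs ih =>
    unfold pvRefill
    split
    · exact ih (buf ++ [r]) (by simp; omega)
    · simp only []; omega

-- one B step computes one A step on the concatenation, and keeps the buffer ≤ 16
lemma pvStep_glue (s : List Int × List Int) (t : Int) (h0 : 0 ≤ t) (h15 : t ≤ 15)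
    (hle : s.1.length ≤ 16) :
    (pvStep s t).1 ++ (pvStep s t).2 = pvStepA (s.1 ++ s.2) t ∧
    (pvStep s t).1.length ≤ 16 := by
  have hglue := pvRefill_glue s.1 s.2
  have hfull := pvRefill_full s.1 s.2 hle
  have hlen := pvRefill_le s.1 s.2 hle
  rcases hbr : pvRefill s.1 s.2 with ⟨b1, b2⟩
  rw [hbr] at hglue hfull hlen
  simp only at hglue hfull hlen
  unfold pvStep pvStepA
  rw [hbr, ← hglue]
  match hb : b1 with
  | [] =>
    have hr : b2 = [] := by
      by_contra h
      have := hfull h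
      simp at this
    simp [hr, PySem.List.pop?]
  | x :: buf' =>
    subst hb
    rw [List.cons_append, PySem.List.pop?_zero_cons]
    simp only [List.length_cons] at hlen
    by_cases ht : t = 0
    · subst ht
      by_cases hre : b2.isEmpty
      · have h2 : b2 = [] := by simpa using hre
        subst h2
        simp
        omega
      · simp [hre]
        omega
    · simp only [if_neg ht]
      have htp : t = ((t.toNat : Nat) : Int) := by omega
      by_cases hre : b2 = []
      · subst hre
        simp [PySem.List.length_insert]
        omega
      · have h16 : (x :: buf').length = 16 := hfull hre
        have hb15 : buf'.length = 15 := by simpa using h16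
        have hins : PySem.List.insert (buf' ++ b2) t x = PySem.List.insert buf' t x ++ b2 := by
          rw [htp, PySem.List.insert_natCast _ _ _ (by simp; omega),
              PySem.List.insert_natCast _ _ _ (by omega)]
          rw [List.take_append_of_le_length (by omega), List.drop_append_of_le_length (by omega)]
          simp
        rw [← hins]
        simp [PySem.List.length_insert]
        omega

-- B's fold over the split state computes A's fold over the plain list
lemma pvFold_glue (ts : List Int) (s : List Int × List Int)
    (hb : ∀ t ∈ ts, 0 ≤ t ∧ t ≤ 15) (hle : s.1.length ≤ 16) :
    (ts.foldl pvStep s).1 ++ (ts.foldl pvStep s).2 = ts.foldl pvStepA (s.1 ++ s.2) := by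
  induction ts generalizing s with
  | nil => rfl
  | cons t ts ih =>
    have h := hb t (by simp)
    obtain ⟨hg, hl⟩ := pvStep_glue s t h.1 h.2 hle
    simp only [List.foldl_cons]
    rw [ih _ (fun u hu => hb u (by simp [hu])) hl, hg]

-- the two key-expansion passes produce the same index sequence
lemma pvTrn_eq (intk_ls : List Int) :
    ((( (PySem.List.pyRange 0 (PySem.List.len intk_ls) 1).map
        (fun i => PySem.Int.band (PySem.List.pyGetD intk_ls i 0) 15)) ++
      ((PySem.List.pyRange 0 (PySem.List.len intk_ls) 1).map
        (fun i => (PySem.Int.band (PySem.List.pyGetD intk_ls i 0) 240) >>> (4 : Nat)))).reverse)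
    = intk_ls.reverse.map (fun k => (PySem.Int.band k 240) >>> (4 : Nat))
      ++ intk_ls.reverse.map (fun k => PySem.Int.band k 15) := by
  have hal : (PySem.List.pyRange 0 (PySem.List.len intk_ls) 1).map
      (fun i => PySem.Int.band (PySem.List.pyGetD intk_ls i 0) 15)
      = intk_ls.map (fun v => PySem.Int.band v 15) := by
    conv_rhs => rw [← PySem.List.map_pyGetD_pyRange_zero intk_ls 0]
    rw [List.map_map]; rfl
  have hah : (PySem.List.pyRange 0 (PySem.List.len intk_ls) 1).map
      (fun i => (PySem.Int.band (PySem.List.pyGetD intk_ls i 0) 240) >>> (4 : Nat))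
      = intk_ls.map (fun v => (PySem.Int.band v 240) >>> (4 : Nat)) := by
    conv_rhs => rw [← PySem.List.map_pyGetD_pyRange_zero intk_ls 0]
    rw [List.map_map]; rfl
  rw [hal, hah, List.reverse_append, List.map_reverse, List.map_reverse]

-- ===== VERDICT (by name: the statement is the Claim_ definition above) =====
theorem TRNSI_spec : Claim_equal_TRNSI := by
  intro in_ls intk_ls _ _
  simp only [Spec_TRNSI, TRNSI, TRNSI_alt]
  rw [pvTrn_eq]
  set tseq := intk_ls.reverse.map (fun k => (PySem.Int.band k 240) >>> (4 : Nat))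
      ++ intk_ls.reverse.map (fun k => PySem.Int.band k 15) with hts
  have hb : ∀ t ∈ tseq, 0 ≤ t ∧ t ≤ 15 := by
    intro t ht
    rw [hts] at ht
    rcases List.mem_append.mp ht with h | h <;> obtain ⟨k, -, rfl⟩ := List.mem_map.mp h
    · exact pvBandShift_bounds k
    · exact pvBand15_bounds k
  have := pvFold_glue tseq ([], in_ls) hb (by simp)
  simp only [List.nil_append] at this
  have hsa : (fun (ls : List Int) (t : Int) =>
      match PySem.List.pop? ls 0 with
      | none => ls
      | some (x, ls') => if t = 0 then ls' ++ [x] else PySem.List.insert ls' t x) = pvStepA := by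
    funext ls t
    rfl
  rw [hsa, ← this]
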